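-- pv_equiv track=rewrite | github.com/naist-nlp/luke-ner | data/convert_conll2003_to_jsonl.py | _conll_words_to_text
-- ===== SOURCE A (Python) =====
-- from typing import Any, Dict, Iterable, List, Tuple, Union
--
-- def _conll_words_to_text(words: Iterable[str]) -> Tuple[str, List[Tuple[int, int]]]:
--     text = ""
--     positions = []
--     offset = 0
--     for word in words:
--         if text:
--             text += " "
--             offset += 1
--         text += word
--         n = len(word)
--         positions.append((offset, offset + n))
--         offset += n
--     return text, positions
-- ===== SOURCE B (Python) =====
-- def _conll_words_to_text(words):
--     ws = list(words)
--     text = " ".join(ws)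
--     lens = [len(w) for w in ws]
--     pre = [0]
--     for n in lens:
--         pre.append(pre[-1] + n)
--     positions = [(p + i, p + i + n) for i, (p, n) in enumerate(zip(pre, lens))]
--     return text, positions
-- ===== Notes on version B (the rewrite author's own statement) =====
-- stated objective: alternative
-- what changed: Replaces A's fused running-offset loop (building text and spans together) by ' '.join plus a prefix-sum table of word lengths, computing each span by closed-form arithmetic start = prefix[i] + i.
-- intended difference: On lists of length >= 2 whose first word is the empty string, A's 'if text:' guard silently drops the separator after the empty leading word (e.g. A(['','a']) = ('a', [(0,0),(0,1)])), while B returns the uniform ' '.join result (' a', [(0,0),(1,2)]), which is the intended one-space-between-every-pair joining. — e.g. on _conll_words_to_text(["", "a"]): A returns ("a", [(0, 0), (0, 1)]), B returns (" a", [(0, 0), (1, 2)])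
import Mathlib
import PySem

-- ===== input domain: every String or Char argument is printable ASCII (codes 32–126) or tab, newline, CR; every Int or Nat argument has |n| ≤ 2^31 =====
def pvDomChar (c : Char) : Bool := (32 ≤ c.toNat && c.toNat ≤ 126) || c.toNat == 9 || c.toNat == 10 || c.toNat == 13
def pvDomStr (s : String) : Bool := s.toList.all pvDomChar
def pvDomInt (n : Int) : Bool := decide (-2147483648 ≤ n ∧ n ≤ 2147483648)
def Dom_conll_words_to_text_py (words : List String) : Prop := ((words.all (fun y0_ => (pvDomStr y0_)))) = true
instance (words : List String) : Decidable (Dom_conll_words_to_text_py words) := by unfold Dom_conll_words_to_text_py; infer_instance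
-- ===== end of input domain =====

-- B replaces A's fused running-offset loop by ' '.join plus a prefix-sum table with
-- closed-form span arithmetic (objective: alternative decomposition, same cost).
-- On lists of length ≥ 2 starting with "" (D_ below) B differs intentionally from A.

-- ===== PORT A =====
-- the Python loop's state (text, positions, offset); text kept as List Char
def conllLoopA : List String → List Char → List (Int × Int) → Int → (List Char × List (Int × Int))
  | [], text, positions, _ => (text, positions)
  | word :: rest, text, positions, offset =>
    let (text, offset) := if text ≠ [] then (text ++ [' '], offset + 1) else (text, offset)
    let text := text ++ word.toList
    let n : Int := PySem.Str.len word
    conllLoopA rest text (positions ++ [(offset, offset + n)]) (offset + n)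

def conll_words_to_text_py (words : List String) : String × (List (Int × Int)) :=
  let (text, positions) := conllLoopA words [] [] 0
  (String.ofList text, positions)

-- ===== PORT B =====
def conll_words_to_text_py_alt (words : List String) : String × (List (Int × Int)) :=
  let text := PySem.Str.join " " words
  let lens : List Int := words.map (fun w => PySem.Str.len w)
  let pre : List Int := lens.foldl (fun acc n => acc ++ [PySem.List.pyGetD acc (-1) 0 + n]) [0]
  let positions := (PySem.List.enumerate (pre.zip lens)).map
    (fun p => (p.2.1 + p.1, p.2.1 + p.1 + p.2.2))
  (text, positions)

-- ===== PRECONDITION & SPEC =====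
-- On lists of length ≥ 2 whose first word is "", A's `if text:` guard silently omits the
-- separator after the empty leading word(s); B returns the intended ' '.join text and spans.
def D_conll_words_to_text_py (words : List String) : Prop :=
  2 ≤ words.length ∧ words.head? = some ""
instance (words : List String) : Decidable (D_conll_words_to_text_py words) := by
  unfold D_conll_words_to_text_py; infer_instance

def Spec_conll_words_to_text_py (words : List String) (out : String × (List (Int × Int))) : Prop :=
  ¬ D_conll_words_to_text_py words → out = conll_words_to_text_py_alt words
instance (words : List String) (out : String × (List (Int × Int))) : Decidable (Spec_conll_words_to_text_py words out) := by
  unfold Spec_conll_words_to_text_py; infer_instance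

def pvDiffWitness_conll_words_to_text_py : List String := ["", "a"]
def pvDiffWitnessOut_conll_words_to_text_py : (String × (List (Int × Int))) × (String × (List (Int × Int))) :=
  (("a", [(0, 0), (0, 1)]), (" a", [(0, 0), (1, 2)]))

-- ===== CLAIM (what is proved, stated in full; the proofs are below) =====
def Claim_unchanged_conll_words_to_text_py : Prop := ∀ (words : List String), Dom_conll_words_to_text_py words → Spec_conll_words_to_text_py words (conll_words_to_text_py words)
def Claim_changed_conll_words_to_text_py : Prop := Dom_conll_words_to_text_py (pvDiffWitness_conll_words_to_text_py) ∧ D_conll_words_to_text_py (pvDiffWitness_conll_words_to_text_py) ∧ conll_words_to_text_py (pvDiffWitness_conll_words_to_text_py) = pvDiffWitnessOut_conll_words_to_text_py.1 ∧ conll_words_to_text_py_alt (pvDiffWitness_conll_words_to_text_py) = pvDiffWitnessOut_conll_words_to_text_py.2 ∧ pvDiffWitnessOut_conll_words_to_text_py.1 ≠ pvDiffWitnessOut_conll_words_to_text_py.2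
def Claim_exact_conll_words_to_text_py : Prop := ∀ (words : List String), Dom_conll_words_to_text_py words → D_conll_words_to_text_py words → conll_words_to_text_py words ≠ conll_words_to_text_py_alt words

-- ===== LEMMAS AND PROOFS =====

-- the text ' '.join produces after a first nonempty word, and the spans from a start offset
def sepChars : List String → List Char
  | [] => []
  | w :: rest => (' ' :: w.toList) ++ sepChars rest

def spansFrom : List String → Int → List (Int × Int)
  | [], _ => []
  | w :: rest, s => (s, s + PySem.Str.len w) :: spansFrom rest (s + PySem.Str.len w + 1)

lemma loopA_nonempty : ∀ (ws : List String) (text : List Char) (pos : List (Int × Int)) (off : Int),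
    text ≠ [] →
    conllLoopA ws text pos off = (text ++ sepChars ws, pos ++ spansFrom ws (off + 1)) := by
  intro ws
  induction ws with
  | nil => intro text pos off h; simp [conllLoopA, sepChars, spansFrom]
  | cons w rest ih =>
    intro text pos off h
    simp only [conllLoopA, if_pos h]
    rw [ih _ _ _ (by simp)]
    simp [sepChars, spansFrom]

lemma loopA_empty_step (w : String) (rest : List String) (pos : List (Int × Int)) (off : Int) :
    conllLoopA (w :: rest) [] pos off
      = conllLoopA rest w.toList (pos ++ [(off, off + PySem.Str.len w)]) (off + PySem.Str.len w) := by
  simp [conllLoopA]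

lemma loopA_pos_prefix : ∀ (ws : List String) (text : List Char) (pos : List (Int × Int)) (off : Int),
    ∃ tl, (conllLoopA ws text pos off).2 = pos ++ tl := by
  intro ws
  induction ws with
  | nil => intro text pos off; exact ⟨[], by simp [conllLoopA]⟩
  | cons w rest ih =>
    intro text pos off
    simp only [conllLoopA]
    split_ifs with h
    · obtain ⟨tl, htl⟩ := ih (text ++ [' '] ++ w.toList) (pos ++ [(off + 1, off + 1 + PySem.Str.len w)]) (off + 1 + PySem.Str.len w)
      exact ⟨_, by rw [htl, List.append_assoc]⟩
    · obtain ⟨tl, htl⟩ := ih (text ++ w.toList) (pos ++ [(off, off + PySem.Str.len w)]) (off + PySem.Str.len w)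
      exact ⟨_, by rw [htl, List.append_assoc]⟩

-- B's join equals the first word followed by sepChars of the rest
lemma join_toList : ∀ (w : String) (rest : List String),
    (PySem.Str.join " " (w :: rest)).toList = w.toList ++ sepChars rest := by
  intro w rest
  induction rest generalizing w with
  | nil => simp [PySem.Str.toList_join, PySem.Chars.join_singleton, sepChars]
  | cons b rest ih =>
    rw [PySem.Str.toList_join, List.map_cons, List.map_cons, PySem.Chars.join_cons_cons]
    rw [show b.toList :: rest.map String.toList = (b :: rest).map String.toList from rfl]
    rw [← PySem.Str.toList_join, ih b, sepChars]
    simp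

def psums : List Int → Int → List Int
  | [], s => [s]
  | n :: rest, s => s :: psums rest (s + n)

lemma pyGetD_neg_one (acc : List Int) (s : Int) :
    PySem.List.pyGetD (acc ++ [s]) (-1) 0 = s := by
  simp [PySem.List.pyGetD, PySem.List.pyGet?, PySem.List.pyIdx?]

lemma pre_eq_psums : ∀ (lens : List Int) (acc : List Int) (s : Int),
    lens.foldl (fun acc n => acc ++ [PySem.List.pyGetD acc (-1) 0 + n]) (acc ++ [s])
      = acc ++ psums lens s := by
  intro lens
  induction lens with
  | nil => intro acc s; simp [psums]
  | cons n rest ih =>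
    intro acc s
    simp only [List.foldl_cons, pyGetD_neg_one]
    have h : acc ++ [s] ++ [s + n] = (acc ++ [s]) ++ [s + n] := by simp
    rw [h, ih (acc ++ [s]) (s + n)]
    simp [psums]

lemma spans_eq : ∀ (ws : List String) (s i : Int),
    (PySem.List.enumerate ((psums (ws.map (fun w => PySem.Str.len w)) s).zip
        (ws.map (fun w => PySem.Str.len w))) i).map
      (fun p => (p.2.1 + p.1, p.2.1 + p.1 + p.2.2))
      = spansFrom ws (s + i) := by
  intro ws
  induction ws with
  | nil => intro s i; simp [psums, spansFrom]
  | cons w rest ih =>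
    intro s i
    simp only [List.map_cons, psums, List.zip_cons_cons, PySem.List.enumerate_cons, spansFrom]
    rw [ih (s + PySem.Str.len w) (i + 1)]
    have h3 : s + PySem.Str.len w + (i + 1) = s + i + PySem.Str.len w + 1 := by ring
    rw [h3]

-- B's result, characterised
lemma alt_eq (ws : List String) :
    conll_words_to_text_py_alt ws = (PySem.Str.join " " ws, spansFrom ws 0) := by
  unfold conll_words_to_text_py_alt
  have h1 : (ws.map (fun w => PySem.Str.len w)).foldl
      (fun acc n => acc ++ [PySem.List.pyGetD acc (-1) 0 + n]) [0]
      = psums (ws.map (fun w => PySem.Str.len w)) 0 := by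
    have := pre_eq_psums (ws.map (fun w => PySem.Str.len w)) [] 0
    simpa using this
  simp only [h1]
  have h2 := spans_eq ws 0 0
  simp only [add_zero] at h2
  rw [h2]

-- ===== VERDICT (by name: the statement is the Claim_ definition above) =====
theorem conll_words_to_text_py_spec : Claim_unchanged_conll_words_to_text_py := by
  intro words _
  unfold Spec_conll_words_to_text_py
  intro hd
  rw [alt_eq]
  match words with
  | [] => decide
  | [w] =>
      have hj : PySem.Str.join " " [w] = w := by
        rw [String.ext_iff, PySem.Str.toList_join]
        simp [PySem.Chars.join_singleton]
      unfold conll_words_to_text_py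
      rw [loopA_empty_step]
      simp [conllLoopA, spansFrom, hj, String.ofList_toList]
  | w :: b :: rest =>
      have hw : w ≠ "" := by
        intro h
        exact hd ⟨by simp, by simp [h]⟩
      have hwl : w.toList ≠ [] := fun hl => hw (by rw [String.ext_iff, hl]; rfl)
      unfold conll_words_to_text_py
      rw [loopA_empty_step, loopA_nonempty (b :: rest) w.toList _ _ hwl]
      have h1 : String.ofList (w.toList ++ sepChars (b :: rest))
          = PySem.Str.join " " (w :: b :: rest) := by
        rw [String.ext_iff, join_toList]; simp
      simp [spansFrom, h1]

theorem conll_words_to_text_py_changed : Claim_changed_conll_words_to_text_py := by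
  unfold Claim_changed_conll_words_to_text_py; decide

theorem conll_words_to_text_py_tight : Claim_exact_conll_words_to_text_py := by
  intro words _ hd
  obtain ⟨hlen, hhead⟩ := hd
  match words with
  | [] => simp at hhead
  | a :: tl =>
    have ha : a = "" := by simpa using hhead
    subst ha
    match tl with
    | [] => simp at hlen
    | w1 :: rest =>
      intro heq
      rw [alt_eq] at heq
      have h2 := congrArg Prod.snd heq
      have hnil : "".toList = ([] : List Char) := rfl
      have hlen0 : PySem.Str.len "" = 0 := rfl
      obtain ⟨tl2, htl2⟩ := loopA_pos_prefix rest w1.toList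
        [((0 : Int), (0 : Int)), ((0 : Int), PySem.Str.len w1)] (PySem.Str.len w1)
      simp only [conll_words_to_text_py] at h2
      rw [loopA_empty_step, hnil, hlen0, loopA_empty_step] at h2
      simp only [add_zero, zero_add, List.nil_append, List.singleton_append, spansFrom,
        hlen0] at h2
      rw [htl2] at h2
      simp at h2
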